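-- pv_equiv track=rewrite | github.com/harishavenue1/harishavenue1.github.io | programs/maxUniqueSubstrings/python_code.py | max_unique_substrings
-- ===== SOURCE A (Python) =====
-- def max_unique_substrings(s):
--     """Find maximum number of unique substrings using backtracking"""
--     def backtrack(start, used):
--         if start == len(s):
--             return 0
--
--         max_count = 0
--         for end in range(start + 1, len(s) + 1):
--             substring = s[start:end]
--             if substring not in used:
--                 used.add(substring)
--                 count = 1 + backtrack(end, used)
--                 max_count = max(max_count, count)
--                 used.remove(substring)
--
--         return max_count
--
--     return backtrack(0, set())
-- ===== SOURCE B (Python) =====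
-- def max_unique_substrings(s):
--     """Extend-or-cut decomposition: instead of a loop over all end positions at
--     each node, recurse one character at a time, growing the current piece and
--     branching: either keep growing the current piece or end it at this position
--     (binary recursion, no for loop)."""
--     def go(rest, piece, used):
--         if not rest:
--             return 0
--         p = piece + rest[0]
--         tail = rest[1:]
--         extend = go(tail, p, used)
--         if p in used:
--             return extend
--         used.add(p)
--         cut = 1 + go(tail, "", used)
--         used.remove(p)
--         return max(extend, cut)
--
--     return go(s, "", set())
-- ===== Notes on version B (the rewrite author's own statement) =====
-- stated objective: alternative
-- what changed: Replaces A's per-node for-loop over all end positions (value = max over ends of 1 + recursive call) with a character-at-a-time binary recursion: each call consumes one character and branches between growing the current piece and ending it at this position, so there is no loop, no slicing over end indices, and no per-node fold of maxima.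
import Mathlib
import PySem

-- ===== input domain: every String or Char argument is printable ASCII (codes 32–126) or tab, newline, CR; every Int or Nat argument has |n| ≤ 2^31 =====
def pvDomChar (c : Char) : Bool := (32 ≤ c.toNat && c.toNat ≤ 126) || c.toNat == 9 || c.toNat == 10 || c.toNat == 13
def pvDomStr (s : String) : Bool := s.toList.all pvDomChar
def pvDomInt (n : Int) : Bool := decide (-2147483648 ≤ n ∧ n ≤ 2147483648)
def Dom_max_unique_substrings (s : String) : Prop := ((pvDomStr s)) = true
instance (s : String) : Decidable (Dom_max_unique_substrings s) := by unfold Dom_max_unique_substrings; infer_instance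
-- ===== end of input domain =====

-- B replaces A's per-node loop over end positions by a character-at-a-time extend-or-cut binary recursion; return values proved equal.

-- ===== PORT A =====
-- A's backtrack(start, used): 0 at the end of the string, otherwise a loop over
-- end = start+1 .. len taking the max of 1 + recursive call for each unused piece.
-- 'fuel' only totalizes the recursion (fuel > len - start on every reached call).
def aBack (s : List Char) : Nat → Nat → List (List Char) → Int
  | 0, _, _ => 0
  | fuel + 1, start, used =>
    if start = s.length then 0
    else
      (List.range' (start + 1) (s.length - start)).foldl
        (fun mc e =>
          let sub := (s.drop start).take (e - start)   -- s[start:end]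
          if sub ∈ used then mc
          else max mc (1 + aBack s fuel e (sub :: used)))
        0

def max_unique_substrings (s : String) : Int :=
  aBack s.toList (s.toList.length + 1) 0 []

-- ===== PORT B =====
-- B's go(rest, piece, used): consume one character, then either keep growing the
-- current piece or end it at this position; structural recursion, no loop, no fuel.
def bGo : List Char → List Char → List (List Char) → Int
  | [], _, _ => 0
  | c :: tail, piece, used =>
    let p := piece ++ [c]
    let ext := bGo tail p used
    if p ∈ used then ext
    else max ext (1 + bGo tail [] (p :: used))

def max_unique_substrings_alt (s : String) : Int :=
  bGo s.toList [] []

-- ===== PRECONDITION & SPEC =====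
def Spec_max_unique_substrings (s : String) (out : Int) : Prop := out = max_unique_substrings_alt s
instance (s : String) (out : Int) : Decidable (Spec_max_unique_substrings s out) := by unfold Spec_max_unique_substrings; infer_instance

-- ===== CLAIM (what is proved, stated in full; the proofs are below) =====
def Claim_equal_max_unique_substrings : Prop := ∀ (s : String), Dom_max_unique_substrings s → Spec_max_unique_substrings s (max_unique_substrings s)

-- ===== LEMMAS AND PROOFS =====

-- Reference form shared by both proofs: A's recursion rebased to the suffix
-- 'rest' with the pending piece prefix 'piece' made explicit.
def aRecFP : Nat → List Char → List Char → List (List Char) → Int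
  | 0, _, _, _ => 0
  | fuel + 1, rest, piece, used =>
    (List.range' 1 rest.length).foldl
      (fun mc e =>
        if piece ++ rest.take e ∈ used then mc
        else max mc (1 + aRecFP fuel (rest.drop e) [] ((piece ++ rest.take e) :: used)))
      0

-- A max-accumulating skip/update fold lets an initial max be pulled out.
theorem foldl_if_max_out {α : Type} (c : α → Prop) [DecidablePred c] (h : α → Int)
    (L : List α) (b : Int) :
    ∀ m : Int, L.foldl (fun mc e => if c e then mc else max mc (h e)) (max b m)
      = max b (L.foldl (fun mc e => if c e then mc else max mc (h e)) m) := by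
  induction L with
  | nil => intro m; simp
  | cons e L ih =>
    intro m
    simp only [List.foldl_cons]
    by_cases hc : c e
    · simp only [if_pos hc]; exact ih m
    · simp only [if_neg hc, max_assoc]; exact ih _

-- A's fold, reindexed from absolute ends to offsets into the suffix.
theorem aBack_eq_aRecFP (s : List Char) :
    ∀ fuel start used, s.length - start < fuel →
      aBack s fuel start used = aRecFP fuel (s.drop start) [] used := by
  intro fuel
  induction fuel with
  | zero => intro start used h; omega
  | succ g ih =>
    intro start used h
    by_cases hs : start = s.length
    · subst hs
      simp [aBack, aRecFP]
    · by_cases hlt : s.length ≤ start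
      · -- start past the end: both folds are over empty ranges
        have h1 : s.length - start = 0 := by omega
        have h2 : s.drop start = [] := List.drop_of_length_le hlt
        simp [aBack, aRecFP, hs, h1, h2]
      · replace hlt : start < s.length := by omega
        simp only [aBack, aRecFP, if_neg hs, List.length_drop]
        have hrange : List.range' (start + 1) (s.length - start)
            = (List.range' 1 (s.length - start)).map (fun e => start + e) := by
          rw [List.map_add_range']
        rw [hrange, List.foldl_map]
        refine PySem.List.foldl_congr_mem _ _ _ _ ?_
        intro mc e he
        have hb := List.mem_range'.mp he
        have he1 : 1 ≤ e := by omega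
        have he2 : e ≤ s.length - start := by omega
        have hsub : start + e - start = e := by omega
        have hdd : s.drop (start + e) = (s.drop start).drop e := by
          rw [List.drop_drop]
        have hfe : s.length - (start + e) < g := by omega
        simp only [hsub, ih (start + e) _ hfe, hdd, List.nil_append]

-- B's extend-or-cut recursion computes the rebased reference.
theorem bGo_eq_aRecFP :
    ∀ (rest piece : List Char) (used : List (List Char)) (fuel : Nat),
      rest.length < fuel → bGo rest piece used = aRecFP fuel rest piece used := by
  intro rest
  induction rest with
  | nil =>
    intro piece used fuel h
    cases fuel with
    | zero => omega
    | succ g => simp [bGo, aRecFP]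
  | cons c tail ih =>
    intro piece used fuel h
    cases fuel with
    | zero => omega
    | succ g =>
      have htg : tail.length < g := by simpa using Nat.lt_of_succ_lt_succ h
      simp only [aRecFP, List.length_cons]
      rw [List.range'_succ, List.foldl_cons]
      have hmap : List.range' 2 tail.length
          = (List.range' 1 tail.length).map (fun e => 1 + e) := by
        rw [List.map_add_range']
      rw [hmap, List.foldl_map]
      have hfun : ∀ (mc : Int) (e : Nat),
          (if piece ++ (c :: tail).take (1 + e) ∈ used then mc
           else max mc (1 + aRecFP g ((c :: tail).drop (1 + e)) []
                  ((piece ++ (c :: tail).take (1 + e)) :: used)))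
          = (if (piece ++ [c]) ++ tail.take e ∈ used then mc
             else max mc (1 + aRecFP g (tail.drop e) []
                    (((piece ++ [c]) ++ tail.take e) :: used))) := by
        intro mc e
        have h1 : (c :: tail).take (1 + e) = c :: tail.take e := by
          rw [Nat.add_comm]; rfl
        have h2 : (c :: tail).drop (1 + e) = tail.drop e := by
          rw [Nat.add_comm]; rfl
        have h3 : piece ++ c :: tail.take e = (piece ++ [c]) ++ tail.take e := by
          simp
        rw [h1, h2, h3]
      simp only [hfun]
      have hfirst1 : (c :: tail).take 1 = [c] := rfl
      have hfirst2 : (c :: tail).drop 1 = tail := rfl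
      rw [hfirst1, hfirst2]
      by_cases hp : piece ++ [c] ∈ used
      · simp only [if_pos hp]
        have : bGo (c :: tail) piece used = bGo tail (piece ++ [c]) used := by
          simp [bGo, hp]
        rw [this, ih (piece ++ [c]) used (g + 1) (by omega)]
        simp [aRecFP]
      · simp only [if_neg hp]
        have hx : max (0 : Int) (1 + aRecFP g tail [] ((piece ++ [c]) :: used))
            = max (1 + aRecFP g tail [] ((piece ++ [c]) :: used)) 0 := max_comm _ _
        rw [hx, foldl_if_max_out]
        have hcut : aRecFP g tail [] ((piece ++ [c]) :: used)
            = bGo tail [] ((piece ++ [c]) :: used) := (ih [] _ g htg).symm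
        have hext : (List.range' 1 tail.length).foldl
            (fun mc e =>
              if (piece ++ [c]) ++ tail.take e ∈ used then mc
              else max mc (1 + aRecFP g (tail.drop e) []
                    (((piece ++ [c]) ++ tail.take e) :: used))) 0
            = bGo tail (piece ++ [c]) used := by
          have := ih (piece ++ [c]) used (g + 1) (by omega)
          simp only [aRecFP] at this
          exact this.symm
        rw [hcut, hext]
        simp [bGo, hp, max_comm]

theorem max_unique_substrings_eq (s : String) :
    max_unique_substrings s = max_unique_substrings_alt s := by
  unfold max_unique_substrings max_unique_substrings_alt
  rw [aBack_eq_aRecFP s.toList (s.toList.length + 1) 0 [] (by omega), List.drop_zero]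
  exact (bGo_eq_aRecFP s.toList [] [] (s.toList.length + 1) (by omega)).symm

-- ===== VERDICT (by name: the statement is the Claim_ definition above) =====
theorem max_unique_substrings_spec : Claim_equal_max_unique_substrings := by
  intro s _
  unfold Spec_max_unique_substrings
  exact max_unique_substrings_eq s
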